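-- pv_equiv track=rewrite | github.com/mateolafalce/padelpro | back/abml_reservas.py | _normalizar_hora
-- ===== SOURCE A (Python) =====
-- HORARIOS_VALIDOS = ['08:00-09:00', '10:00-11:00', '12:00-13:00', '14:00-15:00',
--                     '16:00-17:00', '18:00-19:00', '20:00-21:00', '22:00-23:00']
--
-- def _normalizar_hora(hora: str):
--     # Si es exactamente un rango válido, retornarlo
--     if hora in HORARIOS_VALIDOS:
--         return hora
--
--     # Si es una hora simple "08:00", buscar si coincide con el inicio de algún rango
--     for rango in HORARIOS_VALIDOS:
--         start = rango.split('-')[0] # "08:00"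
--         if hora == start:
--             return rango
--
--     # Si no se encuentra, retornar tal cual para que falle o intentar manejarlo
--     return hora
-- ===== SOURCE B (Python) =====
-- def _normalizar_hora(hora: str):
--     # Parse arithmetically instead of scanning the table: a valid input is
--     # "HH:00" or "HH:00-..." with HH even and 8 <= HH <= 22; the range is computed.
--     s = hora[:5]
--     if len(s) == 5 and s[2:] == ':00' and s[:2].isdigit():
--         h = int(s[:2])
--         if 8 <= h and h <= 22 and h % 2 == 0:
--             rango = str(h).zfill(2) + ':00-' + str(h + 1).zfill(2) + ':00'
--             if hora == s or hora == rango: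
--                 return rango
--     return hora
-- ===== Notes on version B (the rewrite author's own statement) =====
-- stated objective: alternative
-- what changed: Instead of testing membership in the hard-coded range list and then linearly scanning it comparing against each split-off start, B parses the hour arithmetically (HH from the first two digits, checks even and 8..22) and builds the range string by formatting, never touching the table.
import Mathlib
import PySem

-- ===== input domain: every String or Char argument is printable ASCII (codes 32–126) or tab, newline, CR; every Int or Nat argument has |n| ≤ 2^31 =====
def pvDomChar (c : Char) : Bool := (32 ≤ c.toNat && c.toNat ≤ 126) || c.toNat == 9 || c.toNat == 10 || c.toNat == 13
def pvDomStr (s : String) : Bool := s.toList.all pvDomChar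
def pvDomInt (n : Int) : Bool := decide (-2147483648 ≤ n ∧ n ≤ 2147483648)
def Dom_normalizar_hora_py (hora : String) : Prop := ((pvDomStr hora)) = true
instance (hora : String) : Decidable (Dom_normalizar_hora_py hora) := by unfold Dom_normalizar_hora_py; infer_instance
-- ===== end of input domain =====

-- B parses the hour arithmetically and formats the range instead of scanning the
-- hard-coded list; objective: alternative (table-free parse, not claimed faster).

-- ===== PORT A =====
def pvHorarios : List String :=
  ["08:00-09:00", "10:00-11:00", "12:00-13:00", "14:00-15:00",
   "16:00-17:00", "18:00-19:00", "20:00-21:00", "22:00-23:00"]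

-- the for-loop with early return; rango.split('-')[0] never raises (splitOn is nonempty)
def pvScan (hora : String) : List String → String
  | [] => hora
  | rango :: rest =>
      if hora = PySem.List.pyGetD ((PySem.Str.split? rango "-").getD []) 0 "" then rango
      else pvScan hora rest

def normalizar_hora_py (hora : String) : String :=
  if hora ∈ pvHorarios then hora
  else pvScan hora pvHorarios

-- ===== PORT B =====
-- B's body, on the char list (PySem string primitives are defined on List Char):
-- s = hora[:5]; if len(s)==5 and s[2:]==':00' and s[:2].isdigit(): h = int(s[:2]); …
-- int(s[:2]) cannot raise there (isdigit holds), so .getD 0 is exact.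
def pvB (t : List Char) : List Char :=
  let s := PySem.List.slice t none (some 5)
  if PySem.Chars.len s = 5 ∧ PySem.List.slice s (some 2) none = [':', '0', '0']
      ∧ PySem.Chars.strIsdigit (PySem.List.slice s none (some 2)) = true then
    let h := (PySem.Int.ofChars? (PySem.List.slice s none (some 2))).getD 0
    if 8 ≤ h ∧ h ≤ 22 ∧ PySem.Int.mod h 2 = 0 then
      let rango := PySem.Chars.zfill (PySem.Int.toChars h) 2 ++ [':', '0', '0', '-']
                    ++ PySem.Chars.zfill (PySem.Int.toChars (h + 1)) 2 ++ [':', '0', '0']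
      if t = s ∨ t = rango then rango else t
    else t
  else t

def normalizar_hora_py_alt (hora : String) : String := String.ofList (pvB hora.toList)

-- ===== PRECONDITION & SPEC =====
def Spec_normalizar_hora_py (hora : String) (out : String) : Prop := out = normalizar_hora_py_alt hora
instance (hora : String) (out : String) : Decidable (Spec_normalizar_hora_py hora out) := by unfold Spec_normalizar_hora_py; infer_instance

-- ===== CLAIM (what is proved, stated in full; the proofs are below) =====
def Claim_equal_normalizar_hora_py : Prop := ∀ (hora : String), Dom_normalizar_hora_py hora → Spec_normalizar_hora_py hora (normalizar_hora_py hora)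

-- ===== LEMMAS AND PROOFS =====

-- the 16 strings on which either program can return something other than its input
def pvKeys : List String :=
  ["08:00-09:00", "08:00", "10:00-11:00", "10:00", "12:00-13:00", "12:00",
   "14:00-15:00", "14:00", "16:00-17:00", "16:00", "18:00-19:00", "18:00",
   "20:00-21:00", "20:00", "22:00-23:00", "22:00"]

theorem pvDigitMem (c : Char) (h : PySem.Chars.isdigit c = true) :
    c ∈ ['0','1','2','3','4','5','6','7','8','9'] := by
  simp only [PySem.Chars.isdigit, Bool.and_eq_true, decide_eq_true_eq] at h
  obtain ⟨h1, h2⟩ := h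
  rw [Char.le_def, UInt32.le_iff_toNat_le] at h1 h2
  have hl : 48 ≤ c.toNat := h1
  have hr : c.toNat ≤ 57 := h2
  have hc : c = Char.ofNat c.toNat := (Char.ofNat_toNat c).symm
  interval_cases h : c.toNat <;> rw [hc] <;> decide

-- two digit chars whose int() value is an even hour in 8..22 are that hour's %02d form
theorem pvPairKey (c1 c2 : Char) (h1 : PySem.Chars.isdigit c1 = true)
    (h2 : PySem.Chars.isdigit c2 = true) (v : Int)
    (hv : (PySem.Int.ofChars? [c1, c2]).getD 0 = v)
    (h8 : 8 ≤ v) (h22 : v ≤ 22) (he : PySem.Int.mod v 2 = 0) :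
    [c1, c2] = PySem.Chars.zfill (PySem.Int.toChars v) 2 ∧
      v ∈ ([8, 10, 12, 14, 16, 18, 20, 22] : List Int) := by
  have m1 := pvDigitMem c1 h1
  have m2 := pvDigitMem c2 h2
  subst hv
  fin_cases m1 <;> fin_cases m2 <;> revert h8 h22 he <;> decide

theorem pvStart1 : PySem.List.pyGetD ((PySem.Str.split? "08:00-09:00" "-").getD []) 0 "" = "08:00" := by decide
theorem pvStart2 : PySem.List.pyGetD ((PySem.Str.split? "10:00-11:00" "-").getD []) 0 "" = "10:00" := by decide
theorem pvStart3 : PySem.List.pyGetD ((PySem.Str.split? "12:00-13:00" "-").getD []) 0 "" = "12:00" := by decide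
theorem pvStart4 : PySem.List.pyGetD ((PySem.Str.split? "14:00-15:00" "-").getD []) 0 "" = "14:00" := by decide
theorem pvStart5 : PySem.List.pyGetD ((PySem.Str.split? "16:00-17:00" "-").getD []) 0 "" = "16:00" := by decide
theorem pvStart6 : PySem.List.pyGetD ((PySem.Str.split? "18:00-19:00" "-").getD []) 0 "" = "18:00" := by decide
theorem pvStart7 : PySem.List.pyGetD ((PySem.Str.split? "20:00-21:00" "-").getD []) 0 "" = "20:00" := by decide
theorem pvStart8 : PySem.List.pyGetD ((PySem.Str.split? "22:00-23:00" "-").getD []) 0 "" = "22:00" := by decide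

theorem pvA_notin (hora : String) (h : hora ∉ pvKeys) : normalizar_hora_py hora = hora := by
  simp only [pvKeys, List.mem_cons, List.not_mem_nil, or_false, not_or] at h
  obtain ⟨h1, h2, h3, h4, h5, h6, h7, h8, h9, h10, h11, h12, h13, h14, h15, h16⟩ := h
  simp [normalizar_hora_py, pvHorarios, pvScan,
    pvStart1, pvStart2, pvStart3, pvStart4, pvStart5, pvStart6, pvStart7, pvStart8,
    h1, h2, h3, h4, h5, h6, h7, h8, h9, h10, h11, h12, h13, h14, h15, h16]

theorem pvB_keys (t : List Char) (h : String.ofList t ∉ pvKeys) : pvB t = t := by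
  unfold pvB
  simp only [PySem.List.slice_to _ (by norm_num : (0:Int) ≤ 5),
    PySem.List.slice_from _ (by norm_num : (0:Int) ≤ 2),
    PySem.List.slice_to _ (by norm_num : (0:Int) ≤ 2),
    show ((5:Int).toNat) = 5 from rfl, show ((2:Int).toNat) = 2 from rfl,
    PySem.Chars.len_eq]
  split
  case isFalse => rfl
  case isTrue hg =>
    obtain ⟨hlen, hmid, hdig⟩ := hg
    rcases t with _ | ⟨a, _ | ⟨b, _ | ⟨c, _ | ⟨d, _ | ⟨e, rest⟩⟩⟩⟩⟩
    · norm_num [List.length_take] at hlen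
    · norm_num [List.length_take] at hlen
    · norm_num [List.length_take] at hlen
    · norm_num [List.length_take] at hlen
    · norm_num [List.length_take] at hlen
    have h5 : List.take 5 (a :: b :: c :: d :: e :: rest) = [a, b, c, d, e] := rfl
    rw [h5] at hmid hdig ⊢
    have hd2 : List.drop 2 [a, b, c, d, e] = [c, d, e] := rfl
    have ht2 : List.take 2 [a, b, c, d, e] = [a, b] := rfl
    rw [hd2] at hmid
    rw [ht2] at hdig ⊢
    obtain ⟨hc, hd, he⟩ : c = ':' ∧ d = '0' ∧ e = '0' := by simpa using hmid
    subst hc; subst hd; subst he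
    simp only [PySem.Chars.strIsdigit, List.isEmpty_cons, List.all_cons, List.all_nil,
      Bool.not_false, Bool.true_and, Bool.and_true, Bool.and_eq_true] at hdig
    obtain ⟨hda, hdb⟩ := hdig
    split
    case isFalse => rfl
    case isTrue hrange =>
      obtain ⟨hv8, hv22, hveven⟩ := hrange
      obtain ⟨hkey, hmem⟩ := pvPairKey a b hda hdb _ rfl hv8 hv22 hveven
      split
      case isTrue heq =>
        rcases heq with heq | heq
        · -- t equals its own 5-char prefix: the input is "HH:00", hence in pvKeys — contradiction
          exfalso
          have hrest : rest = [] := by simpa using heq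
          subst hrest
          apply h
          rw [show a :: b :: ':' :: '0' :: '0' :: ([] : List Char)
                = [a, b] ++ [':', '0', '0'] from rfl, hkey]
          simp only [List.mem_cons, List.not_mem_nil, or_false] at hmem
          rcases hmem with hv | hv | hv | hv | hv | hv | hv | hv <;> rw [hv] <;> decide
        · -- t equals the built range: the returned value is t itself
          exact heq.symm
      case isFalse => rfl

-- ===== VERDICT (by name: the statement is the Claim_ definition above) =====
theorem normalizar_hora_py_spec : Claim_equal_normalizar_hora_py := by
  intro hora _
  unfold Spec_normalizar_hora_py
  by_cases h : hora ∈ pvKeys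
  · fin_cases h <;> decide
  · rw [pvA_notin hora h]
    unfold normalizar_hora_py_alt
    rw [pvB_keys hora.toList (by rw [String.ofList_toList]; exact h), String.ofList_toList]
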